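-- pv_equiv track=rewrite | github.com/vgandhi1/FreeCodeCamp-daily_challenges | Oct_25_2025-complementary_dna.py | complementary_dna
-- ===== SOURCE A (Python) =====
-- def complementary_dna(strand):
--
--     DNA_letters = ['A','C','G','T']
--     strand = strand.upper()
--
--
--     check_DNA_ltters = all(letter in DNA_letters for letter in strand.upper())
--     if check_DNA_ltters:
--         # Apply the translation map
--         complement_map = str.maketrans("ACGT", "TGCA")
--         final_strand = strand.translate(complement_map)
--         return final_strand
--
--     else:
--         return "Incorrect DNA strand"
-- ===== SOURCE B (Python) =====
-- def complementary_dna(strand):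
--     comp = {'A': 'T', 'C': 'G', 'G': 'C', 'T': 'A'}
--     out = []
--     for ch in strand.upper():
--         m = comp.get(ch)
--         if m is None:
--             return "Incorrect DNA strand"
--         out.append(m)
--     return ''.join(out)
-- ===== Notes on version B (the rewrite author's own statement) =====
-- stated objective: simpler
-- what changed: B fuses A's two passes (an all() validation pass, then a str.translate pass) into one loop that maps each character through a complement dict and returns the error string immediately on the first invalid character.
import Mathlib
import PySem

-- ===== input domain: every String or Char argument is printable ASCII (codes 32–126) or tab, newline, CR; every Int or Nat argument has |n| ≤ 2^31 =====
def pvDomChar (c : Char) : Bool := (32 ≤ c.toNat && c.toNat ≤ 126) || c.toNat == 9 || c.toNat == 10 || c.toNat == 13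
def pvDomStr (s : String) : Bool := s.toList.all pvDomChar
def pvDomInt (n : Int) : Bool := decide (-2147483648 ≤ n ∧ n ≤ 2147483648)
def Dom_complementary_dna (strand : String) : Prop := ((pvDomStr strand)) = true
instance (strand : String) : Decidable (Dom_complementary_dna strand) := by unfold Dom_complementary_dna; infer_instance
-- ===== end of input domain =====

-- B fuses A's two passes (validate with all(), then str.translate) into one validate-while-mapping pass; objective: simpler.

-- ===== PORT A =====
-- str.translate with maketrans "ACGT" -> "TGCA": per-character map, chars outside the table unchanged (exact on this 4-char table)
def pyTranslateACGT (c : Char) : Char :=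
  if c = 'A' then 'T' else if c = 'C' then 'G' else if c = 'G' then 'C' else if c = 'T' then 'A' else c

def complementary_dna (strand : String) : String :=
  let strand1 := PySem.Str.upper strand
  let check_DNA_ltters := (PySem.Str.upper strand1).toList.all (fun letter => ['A','C','G','T'].contains letter)
  if check_DNA_ltters then
    String.mk (strand1.toList.map pyTranslateACGT)
  else
    "Incorrect DNA strand"

-- ===== PORT B =====
-- comp.get(ch): the dict lookup of Source B
def dnaCompl? (c : Char) : Option Char :=
  if c = 'A' then some 'T' else if c = 'C' then some 'G' else if c = 'G' then some 'C' else if c = 'T' then some 'A' else none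

-- the for-loop of Source B: out is the accumulator (kept reversed), early return on the first invalid char
def dnaGo : List Char → List Char → String
  | [], acc => String.mk acc.reverse
  | c :: rest, acc =>
    match dnaCompl? c with
    | none => "Incorrect DNA strand"
    | some m => dnaGo rest (m :: acc)

def complementary_dna_alt (strand : String) : String :=
  dnaGo (PySem.Str.upper strand).toList []

-- ===== PRECONDITION & SPEC =====
def Spec_complementary_dna (strand : String) (out : String) : Prop := out = complementary_dna_alt strand
instance (strand : String) (out : String) : Decidable (Spec_complementary_dna strand out) := by unfold Spec_complementary_dna; infer_instance

-- ===== CLAIM (what is proved, stated in full; the proofs are below) =====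
def Claim_equal_complementary_dna : Prop := ∀ (strand : String), Dom_complementary_dna strand → Spec_complementary_dna strand (complementary_dna strand)

-- ===== LEMMAS AND PROOFS =====

-- ===== VERDICT (by name: the statement is the Claim_ definition above) =====
theorem upperChar_idem (c : Char) : PySem.Chars.upperChar (PySem.Chars.upperChar c) = PySem.Chars.upperChar c := by
  unfold PySem.Chars.upperChar
  split_ifs with h1 h2 <;> try rfl
  exfalso
  simp only [PySem.Chars.islower, Bool.and_eq_true, decide_eq_true_eq, Char.le_def,
    UInt32.le_iff_toNat_le] at h1 h2
  have ha : ('a' : Char).val.toNat = 97 := rfl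
  have hz : ('z' : Char).val.toNat = 122 := rfl
  have hc : c.val.toNat = c.toNat := rfl
  have hvalid : (c.toNat - 32).isValidChar := by
    unfold Nat.isValidChar; left; omega
  have hv : (Char.ofNat (c.toNat - 32)).val.toNat = c.toNat - 32 := by
    rw [show (Char.ofNat (c.toNat - 32)).val.toNat = (Char.ofNat (c.toNat - 32)).toNat from rfl,
      Char.toNat_ofNat, if_pos hvalid]
  omega

theorem dnaGo_eq (l : List Char) : ∀ acc : List Char,
    dnaGo l acc =
      if l.all (fun c => (['A','C','G','T'] : List Char).contains c) then
        String.mk (acc.reverse ++ l.map pyTranslateACGT)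
      else "Incorrect DNA strand" := by
  induction l with
  | nil => intro acc; simp [dnaGo]
  | cons c rest ih =>
    intro acc
    by_cases hc : (['A','C','G','T'] : List Char).contains c
    · simp only [List.contains_cons] at hc
      simp only [List.contains_nil] at hc
      rcases (by simpa using hc : c = 'A' ∨ c = 'C' ∨ c = 'G' ∨ c = 'T') with h | h | h | h <;>
        subst h <;> simp [dnaGo, dnaCompl?, pyTranslateACGT, ih]
    · have hn : dnaCompl? c = none := by
        have h4 : ¬(c = 'A' ∨ c = 'C' ∨ c = 'G' ∨ c = 'T') := by simpa using hc
        simp only [dnaCompl?]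
        split_ifs with a b d e <;> simp_all
      have hfalse : ((c :: rest).all (fun c => (['A','C','G','T'] : List Char).contains c)) = false := by
        simp only [List.all_cons, Bool.and_eq_false_iff]
        left; simpa using hc
      simp only [dnaGo, hn]
      rw [hfalse]
      simp

theorem complementary_dna_spec : Claim_equal_complementary_dna := by
  intro strand _
  unfold Spec_complementary_dna complementary_dna complementary_dna_alt
  rw [dnaGo_eq]
  have h : (PySem.Str.upper (PySem.Str.upper strand)).toList = (PySem.Str.upper strand).toList := by
    rw [PySem.Str.toList_upper, PySem.Str.toList_upper]
    simp [PySem.Chars.upper, Function.comp_def, upperChar_idem]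
  simp [h]
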